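-- pv_equiv track=rewrite | github.com/doronrpa-hub/rpa-port-platform | functions/lib/ocean_tracker.py | _derive_ocean_step
-- ===== SOURCE A (Python) =====
-- OCEAN_EVENT_TO_STEP = {
--     # Import direction: ocean events precede TaskYam port steps
--     "import": {
--         "AE": "vessel_loaded",
--         "VD": "vessel_departed",
--         "TS": "transshipment",
--         "TL": "transshipment_loaded",
--         "VA": "vessel_arrived",
--         "UV": "port_unloading",      # Overlaps with TaskYam — TaskYam wins
--     },
--     # Export direction: ocean events follow TaskYam port steps
--     "export": {
--         "EE": "empty_pickup",
--         "GI": "cargo_entry",          # Overlaps with TaskYam — TaskYam wins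
--         "AE": "vessel_loaded",
--         "VD": "vessel_departed",
--         "VA": "vessel_arrived",
--         "RD": "container_returned",
--     },
-- }
--
-- OCEAN_STEP_PRIORITY = {
--     "pending": 0,
--     "empty_pickup": 10,
--     "cargo_entry": 20,
--     "vessel_loaded": 30,
--     "vessel_departed": 40,
--     "transshipment": 45,
--     "transshipment_loaded": 46,
--     "vessel_arrived": 50,
--     "port_unloading": 60,
--     "container_returned": 90,
-- }
--
-- def _derive_ocean_step(events, direction):
--     """Derive the current ocean-leg step from merged events."""
--     if not events:
--         return None
--
--     step_map = OCEAN_EVENT_TO_STEP.get(direction, OCEAN_EVENT_TO_STEP["import"])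
--     best_step = None
--     best_priority = -1
--
--     for evt in events:
--         step = step_map.get(evt["code"])
--         if step:
--             priority = OCEAN_STEP_PRIORITY.get(step, 0)
--             if priority > best_priority:
--                 best_priority = priority
--                 best_step = step
--
--     return best_step
-- ===== SOURCE B (Python) =====
-- OCEAN_EVENT_TO_STEP = {
--     "import": {
--         "AE": "vessel_loaded",
--         "VD": "vessel_departed",
--         "TS": "transshipment",
--         "TL": "transshipment_loaded",
--         "VA": "vessel_arrived",
--         "UV": "port_unloading",
--     },
--     "export": {
--         "EE": "empty_pickup",
--         "GI": "cargo_entry",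
--         "AE": "vessel_loaded",
--         "VD": "vessel_departed",
--         "VA": "vessel_arrived",
--         "RD": "container_returned",
--     },
-- }
--
-- OCEAN_STEP_PRIORITY = {
--     "pending": 0,
--     "empty_pickup": 10,
--     "cargo_entry": 20,
--     "vessel_loaded": 30,
--     "vessel_departed": 40,
--     "transshipment": 45,
--     "transshipment_loaded": 46,
--     "vessel_arrived": 50,
--     "port_unloading": 60,
--     "container_returned": 90,
-- }
--
--
-- def _derive_ocean_step(events, direction):
--     """Derive the current ocean-leg step from merged events."""
--     step_map = OCEAN_EVENT_TO_STEP.get(direction, OCEAN_EVENT_TO_STEP["import"])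
--
--     present = set()
--     for evt in events:
--         step = step_map.get(evt["code"])
--         if step:
--             present.add(step)
--
--     for step, _prio in sorted(OCEAN_STEP_PRIORITY.items(),
--                               key=lambda kv: kv[1], reverse=True):
--         if step in present:
--             return step
--     return None
-- ===== Notes on version B (the rewrite author's own statement) =====
-- stated objective: alternative
-- what changed: Instead of scanning events while tracking a running (best_step, best_priority) maximum, B collects the set of steps present in one pass and then walks the constant priority table in descending priority order, returning the first step found in the set.
import Mathlib
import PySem

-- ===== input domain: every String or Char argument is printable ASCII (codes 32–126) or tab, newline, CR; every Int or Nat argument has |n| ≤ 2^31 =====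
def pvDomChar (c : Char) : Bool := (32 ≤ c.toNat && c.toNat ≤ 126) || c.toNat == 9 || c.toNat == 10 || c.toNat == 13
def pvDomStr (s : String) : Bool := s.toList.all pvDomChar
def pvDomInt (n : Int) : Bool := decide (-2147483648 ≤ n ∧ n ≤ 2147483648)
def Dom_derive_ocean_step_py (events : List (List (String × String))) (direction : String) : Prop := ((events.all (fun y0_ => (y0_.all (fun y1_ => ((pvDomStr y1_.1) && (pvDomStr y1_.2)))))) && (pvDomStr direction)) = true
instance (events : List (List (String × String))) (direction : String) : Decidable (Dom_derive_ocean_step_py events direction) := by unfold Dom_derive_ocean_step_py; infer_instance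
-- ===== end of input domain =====

-- B replaces A's running (best_step, best_priority) maximum over events by a one-pass set of
-- present steps followed by a scan of the priority table sorted by priority descending
-- (objective: alternative decomposition, same cost).

-- shared module-level constants (OCEAN_EVENT_TO_STEP, OCEAN_STEP_PRIORITY)
def pvImportMap : PySem.Dict String String := PySem.Dict.mk
  [("AE", "vessel_loaded"), ("VD", "vessel_departed"), ("TS", "transshipment"),
   ("TL", "transshipment_loaded"), ("VA", "vessel_arrived"), ("UV", "port_unloading")]

def pvExportMap : PySem.Dict String String := PySem.Dict.mk
  [("EE", "empty_pickup"), ("GI", "cargo_entry"), ("AE", "vessel_loaded"),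
   ("VD", "vessel_departed"), ("VA", "vessel_arrived"), ("RD", "container_returned")]

def pvOceanEventToStep : PySem.Dict String (PySem.Dict String String) := PySem.Dict.mk
  [("import", pvImportMap), ("export", pvExportMap)]

def pvOceanStepPriority : PySem.Dict String Int := PySem.Dict.mk
  [("pending", 0), ("empty_pickup", 10), ("cargo_entry", 20), ("vessel_loaded", 30),
   ("vessel_departed", 40), ("transshipment", 45), ("transshipment_loaded", 46),
   ("vessel_arrived", 50), ("port_unloading", 60), ("container_returned", 90)]

-- ===== PORT A =====
-- literal port of A: early None on empty, then a fold keeping (best_step, best_priority).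
-- evt["code"] raises KeyError when missing: excluded by Pre_ below; '.getD ""' is only
-- reached outside Pre_.
def derive_ocean_step_py (events : List (List (String × String))) (direction : String) : Option String :=
  if events = [] then none
  else
    let step_map := (PySem.Dict.get? pvOceanEventToStep direction).getD pvImportMap
    (List.foldl (fun (st : Option String × Int) evt =>
        match PySem.Dict.get? step_map ((PySem.Dict.get? (PySem.Dict.mk evt) "code").getD "") with
        | some step =>
          if step ≠ "" then
            let priority := PySem.Dict.getD pvOceanStepPriority step 0
            if priority > st.2 then (some step, priority) else st
          else st
        | none => st) (none, -1) events).1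

-- ===== PORT B =====
-- literal port of B: collect the set of present steps, then return the first entry of the
-- priority table sorted by priority descending whose step is present.
def derive_ocean_step_py_alt (events : List (List (String × String))) (direction : String) : Option String :=
  let step_map := (PySem.Dict.get? pvOceanEventToStep direction).getD pvImportMap
  let present : PySem.Set String := List.foldl (fun (s : PySem.Set String) evt =>
      match PySem.Dict.get? step_map ((PySem.Dict.get? (PySem.Dict.mk evt) "code").getD "") with
      | some step => if step ≠ "" then PySem.Set.add s step else s
      | none => s) PySem.Set.empty events
  ((PySem.List.sorted pvOceanStepPriority.items (fun kv => kv.2) true).find?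
      (fun kv => PySem.Set.contains present kv.1)).map (fun kv => kv.1)

-- ===== PRECONDITION & SPEC =====
-- Pre_ excludes only the inputs on which A raises KeyError: an event dict without a "code" key.
def Pre_derive_ocean_step_py (events : List (List (String × String))) (direction : String) : Prop :=
  ∀ evt ∈ events, "code" ∈ evt.map Prod.fst

instance (events : List (List (String × String))) (direction : String) : Decidable (Pre_derive_ocean_step_py events direction) := by unfold Pre_derive_ocean_step_py; infer_instance

def pvWitness_derive_ocean_step_py : (List (List (String × String))) × String :=
  ([[("code", "AE")], [("code", "VD")]], "import")

def Spec_derive_ocean_step_py (events : List (List (String × String))) (direction : String) (out : Option String) : Prop := out = derive_ocean_step_py_alt events direction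
instance (events : List (List (String × String))) (direction : String) (out : Option String) : Decidable (Spec_derive_ocean_step_py events direction out) := by unfold Spec_derive_ocean_step_py; infer_instance

-- ===== CLAIM (what is proved, stated in full; the proofs are below) =====
def Claim_equal_derive_ocean_step_py : Prop := ∀ (events : List (List (String × String))) (direction : String), Dom_derive_ocean_step_py events direction → Pre_derive_ocean_step_py events direction → Spec_derive_ocean_step_py events direction (derive_ocean_step_py events direction)

-- ===== LEMMAS AND PROOFS =====

-- the step an event contributes (None / falsy collapsed to none)
def pvStepOf (m : PySem.Dict String String) (evt : List (String × String)) : Option String :=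
  match PySem.Dict.get? m ((PySem.Dict.get? (PySem.Dict.mk evt) "code").getD "") with
  | some step => if step ≠ "" then some step else none
  | none => none

-- priority key of a candidate (none ↦ -1, as in A's initial state)
def pvKeyOf (r : Option String) : Int :=
  match r with
  | none => -1
  | some s => PySem.Dict.getD pvOceanStepPriority s 0

def pvMergeO (t r : Option String) : Option String := if pvKeyOf t > pvKeyOf r then t else r
def pvMergeR (b r : Option String) : Option String := if pvKeyOf r > pvKeyOf b then r else b

-- reference value: right fold of pvMergeO over the events' steps
def pvR (m : PySem.Dict String String) (events : List (List (String × String))) : Option String :=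
  events.foldr (fun evt r => pvMergeO (pvStepOf m evt) r) none

-- the possible candidates (none or a value of either step map)
def pvVL : List (Option String) :=
  [none, some "empty_pickup", some "cargo_entry", some "vessel_loaded", some "vessel_departed",
   some "transshipment", some "transshipment_loaded", some "vessel_arrived",
   some "port_unloading", some "container_returned"]

-- B's table scan as a function of the nine membership booleans (priority-descending order)
def pvPickB (c pu va tl ts vd vl ce ep : Bool) : Option String :=
  if c then some "container_returned" else if pu then some "port_unloading"
  else if va then some "vessel_arrived" else if tl then some "transshipment_loaded"
  else if ts then some "transshipment" else if vd then some "vessel_departed"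
  else if vl then some "vessel_loaded" else if ce then some "cargo_entry"
  else if ep then some "empty_pickup" else none

def pvHas (m : PySem.Dict String String) (events : List (List (String × String))) (x : String) : Bool :=
  events.any (fun evt => pvStepOf m evt == some x)

theorem pvMap_valid (direction : String) :
    (PySem.Dict.get? pvOceanEventToStep direction).getD pvImportMap = pvImportMap ∨
    (PySem.Dict.get? pvOceanEventToStep direction).getD pvImportMap = pvExportMap := by
  simp only [pvOceanEventToStep, PySem.Dict.get?]
  cases h1 : ("import" == direction) <;> cases h2 : ("export" == direction) <;>
    simp [List.find?, h1, h2]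

theorem pvStepOf_valid (m : PySem.Dict String String)
    (hm : m = pvImportMap ∨ m = pvExportMap) (evt : List (String × String)) :
    pvStepOf m evt ∈ pvVL := by
  rcases hm with h | h <;> subst h <;>
    · unfold pvStepOf
      simp only [pvImportMap, pvExportMap, PySem.Dict.get?]
      rcases hf : List.find? _ _ with _ | kv
      · simp [pvVL]
      · have hmem := List.mem_of_find?_eq_some hf
        fin_cases hmem <;> simp [pvVL]

theorem pvMergeO_valid (t r : Option String) (ht : t ∈ pvVL) (hr : r ∈ pvVL) :
    pvMergeO t r ∈ pvVL := by
  unfold pvMergeO; split_ifs <;> assumption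

theorem pvR_valid (m : PySem.Dict String String)
    (hm : m = pvImportMap ∨ m = pvExportMap) (events : List (List (String × String))) :
    pvR m events ∈ pvVL := by
  induction events with
  | nil => simp [pvR, pvVL]
  | cons e es ih =>
      simp only [pvR, List.foldr_cons] at *
      exact pvMergeO_valid _ _ (pvStepOf_valid m hm e) ih

theorem pvMerge_assoc : ∀ b ∈ pvVL, ∀ t ∈ pvVL, ∀ r ∈ pvVL,
    pvMergeR b (pvMergeO t r) = pvMergeR (pvMergeO t b) r := by decide

theorem pvMergeR_none : ∀ r ∈ pvVL, pvMergeR none r = r := by decide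

theorem pvMergeR_self : ∀ b ∈ pvVL, pvMergeR b none = b := by decide

theorem pvMergeO_none : ∀ b ∈ pvVL, pvMergeO none b = b := by decide

theorem pvPickB_merge : ∀ t ∈ pvVL, ∀ b1 b2 b3 b4 b5 b6 b7 b8 b9 : Bool,
    pvPickB ((t == some "container_returned") || b1) ((t == some "port_unloading") || b2)
      ((t == some "vessel_arrived") || b3) ((t == some "transshipment_loaded") || b4)
      ((t == some "transshipment") || b5) ((t == some "vessel_departed") || b6)
      ((t == some "vessel_loaded") || b7) ((t == some "cargo_entry") || b8)
      ((t == some "empty_pickup") || b9)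
    = pvMergeO t (pvPickB b1 b2 b3 b4 b5 b6 b7 b8 b9) := by decide

theorem pvNotPending : ∀ t ∈ pvVL, (t == some "pending") = false := by decide

-- A's fold computes pvMergeR of the incoming candidate and the reference value
theorem pvFoldA_eq (m : PySem.Dict String String)
    (hm : m = pvImportMap ∨ m = pvExportMap) :
    ∀ (events : List (List (String × String))) (b : Option String), b ∈ pvVL →
    (List.foldl (fun (st : Option String × Int) evt =>
        match PySem.Dict.get? m ((PySem.Dict.get? (PySem.Dict.mk evt) "code").getD "") with
        | some step =>
          if step ≠ "" then
            let priority := PySem.Dict.getD pvOceanStepPriority step 0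
            if priority > st.2 then (some step, priority) else st
          else st
        | none => st) (b, pvKeyOf b) events).1 = pvMergeR b (pvR m events) := by
  intro events
  induction events with
  | nil =>
      intro b hb
      rw [List.foldl_nil]
      exact (pvMergeR_self b hb).symm
  | cons e es ih =>
      intro b hb
      have hstep : pvStepOf m e ∈ pvVL := pvStepOf_valid m hm e
      have hbody : (match PySem.Dict.get? m ((PySem.Dict.get? (PySem.Dict.mk e) "code").getD "") with
          | some step =>
            if step ≠ "" then
              let priority := PySem.Dict.getD pvOceanStepPriority step 0
              if priority > ((b : Option String), pvKeyOf b).2 then (some step, priority) else (b, pvKeyOf b)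
            else (b, pvKeyOf b)
          | none => (b, pvKeyOf b))
          = (pvMergeO (pvStepOf m e) b, pvKeyOf (pvMergeO (pvStepOf m e) b)) := by
        simp only [pvStepOf]
        cases hg : PySem.Dict.get? m ((PySem.Dict.get? (PySem.Dict.mk e) "code").getD "") with
        | none => simp only [pvMergeO_none b hb]
        | some s =>
            by_cases hs : s = ""
            · simp only [hs, ne_eq, not_true_eq_false, if_false, pvMergeO_none b hb]
            · have hs' : (s ≠ "") = True := by simp [hs]
              simp only [hs', if_true]
              simp only [pvMergeO]
              have hk : pvKeyOf (some s) = PySem.Dict.getD pvOceanStepPriority s 0 := rfl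
              rw [hk]
              split_ifs with h
              · rw [hk]
              · rfl
      rw [List.foldl_cons, hbody, ih _ (pvMergeO_valid _ _ hstep hb)]
      have hR : pvR m (e :: es) = pvMergeO (pvStepOf m e) (pvR m es) := by
        simp [pvR]
      rw [hR, pvMerge_assoc b hb _ hstep _ (pvR_valid m hm es)]

-- membership in B's accumulated set
theorem pvMemFold (m : PySem.Dict String String) :
    ∀ (events : List (List (String × String))) (s0 : PySem.Set String) (x : String),
    (x ∈ List.foldl (fun (s : PySem.Set String) evt =>
        match PySem.Dict.get? m ((PySem.Dict.get? (PySem.Dict.mk evt) "code").getD "") with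
        | some step => if step ≠ "" then PySem.Set.add s step else s
        | none => s) s0 events) ↔ (pvHas m events x = true ∨ x ∈ s0) := by
  intro events
  induction events with
  | nil => simp [pvHas]
  | cons e es ih =>
      intro s0 x
      rw [List.foldl_cons]
      have hbody : (match PySem.Dict.get? m ((PySem.Dict.get? (PySem.Dict.mk e) "code").getD "") with
          | some step => if step ≠ "" then PySem.Set.add s0 step else s0
          | none => s0)
          = (match pvStepOf m e with
             | some step => PySem.Set.add s0 step
             | none => s0) := by
        simp only [pvStepOf]
        cases hg : PySem.Dict.get? m ((PySem.Dict.get? (PySem.Dict.mk e) "code").getD "") with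
        | none => simp
        | some s => by_cases hs : s = "" <;> simp [hs]
      rw [hbody, ih]
      cases ht : pvStepOf m e with
      | none => simp [pvHas, ht]
      | some s =>
          simp only [pvHas, List.any_cons, ht, PySem.Set.mem_add, Bool.or_eq_true,
            beq_iff_eq, Option.some.injEq]
          have hx : (s = x) = (x = s) := propext eq_comm
          rw [hx]
          tauto

theorem pvContainsFold (m : PySem.Dict String String)
    (events : List (List (String × String))) (x : String) :
    PySem.Set.contains (List.foldl (fun (s : PySem.Set String) evt =>
        match PySem.Dict.get? m ((PySem.Dict.get? (PySem.Dict.mk evt) "code").getD "") with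
        | some step => if step ≠ "" then PySem.Set.add s step else s
        | none => s) PySem.Set.empty events) x = pvHas m events x := by
  rw [Bool.eq_iff_iff, PySem.Set.contains_iff, pvMemFold]
  simp [PySem.Set.empty]

-- B's table scan equals pvPickB of the membership booleans
theorem pvSortedLit : PySem.List.sorted pvOceanStepPriority.items (fun kv => kv.2) true =
    [("container_returned", (90 : Int)), ("port_unloading", 60), ("vessel_arrived", 50),
     ("transshipment_loaded", 46), ("transshipment", 45), ("vessel_departed", 40),
     ("vessel_loaded", 30), ("cargo_entry", 20), ("empty_pickup", 10), ("pending", 0)] := by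
  decide

theorem pvHasPending (m : PySem.Dict String String)
    (hm : m = pvImportMap ∨ m = pvExportMap) (events : List (List (String × String))) :
    pvHas m events "pending" = false := by
  simp only [pvHas, List.any_eq_false]
  intro e he
  have := pvStepOf_valid m hm e
  revert this
  generalize pvStepOf m e = t
  intro h
  exact (by simpa using pvNotPending t h)

-- reference value as pvPickB of the membership booleans
theorem pvR_eq_pick (m : PySem.Dict String String)
    (hm : m = pvImportMap ∨ m = pvExportMap) (events : List (List (String × String))) :
    pvR m events = pvPickB (pvHas m events "container_returned") (pvHas m events "port_unloading")
      (pvHas m events "vessel_arrived") (pvHas m events "transshipment_loaded")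
      (pvHas m events "transshipment") (pvHas m events "vessel_departed")
      (pvHas m events "vessel_loaded") (pvHas m events "cargo_entry")
      (pvHas m events "empty_pickup") := by
  induction events with
  | nil => simp [pvR, pvHas, pvPickB]
  | cons e es ih =>
      have hstep := pvStepOf_valid m hm e
      simp only [pvR, List.foldr_cons, pvHas, List.any_cons] at *
      rw [ih, pvPickB_merge _ hstep]

theorem pvA_eq_R (events : List (List (String × String))) (direction : String) :
    derive_ocean_step_py events direction =
      pvR ((PySem.Dict.get? pvOceanEventToStep direction).getD pvImportMap) events := by
  set m := (PySem.Dict.get? pvOceanEventToStep direction).getD pvImportMap with hmdef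
  have hm := pvMap_valid direction
  rw [← hmdef] at hm
  by_cases he : events = []
  · subst he; simp [derive_ocean_step_py, pvR]
  · rw [derive_ocean_step_py, if_neg he]
    have h0 : ((none : Option String), (-1 : Int)) = (none, pvKeyOf none) := by rfl
    rw [h0]
    rw [pvFoldA_eq m hm events none (by simp [pvVL])]
    exact pvMergeR_none _ (pvR_valid m hm events)

theorem pvB_eq_R (events : List (List (String × String))) (direction : String) :
    derive_ocean_step_py_alt events direction =
      pvR ((PySem.Dict.get? pvOceanEventToStep direction).getD pvImportMap) events := by
  set m := (PySem.Dict.get? pvOceanEventToStep direction).getD pvImportMap with hmdef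
  have hm := pvMap_valid direction
  rw [← hmdef] at hm
  rw [derive_ocean_step_py_alt]
  simp only [← hmdef, pvSortedLit, List.find?]
  simp only [pvContainsFold m events, pvHasPending m hm events]
  rw [pvR_eq_pick m hm events]
  cases h1 : pvHas m events "container_returned" <;>
  cases h2 : pvHas m events "port_unloading" <;>
  cases h3 : pvHas m events "vessel_arrived" <;>
  cases h4 : pvHas m events "transshipment_loaded" <;>
  cases h5 : pvHas m events "transshipment" <;>
  cases h6 : pvHas m events "vessel_departed" <;>
  cases h7 : pvHas m events "vessel_loaded" <;>
  cases h8 : pvHas m events "cargo_entry" <;>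
  cases h9 : pvHas m events "empty_pickup" <;>
  simp [pvPickB]

-- ===== VERDICT (by name: the statement is the Claim_ definition above) =====
theorem derive_ocean_step_py_spec : Claim_equal_derive_ocean_step_py := by
  intro events direction _ _
  unfold Spec_derive_ocean_step_py
  rw [pvA_eq_R, pvB_eq_R]
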